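-- pv_equiv track=rewrite | github.com/fjoao9744/Estudos-Python-2 | Programas/desafio.py | descript
-- ===== SOURCE A (Python) =====
-- from itertools import permutations
--
-- def cript(data):
--     """Calcula todas as somas possíveis dos dígitos do número"""
--     digits = set()
--
--     for c in range(len(data)):
--         for num in data:
--             digits.add(data[c] + num)  # Soma os valores do número
--
--     return digits
--
-- def descript(valid_set, size):
--     """Encontra os números possíveis que geram o conjunto de somas"""
--     digitos_possiveis = [0, 2, 4, 6, 8]  # Apenas números pares
--
--     resultados = set()
--
--     for comb in permutations(digitos_possiveis, size):
--         sdata = list(comb)  # A tupla de permutação é transformada em lista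
--
--         # Compara a soma das permutações com o conjunto válido
--         if cript(sdata) == valid_set:
--             numero = "".join(map(str, comb))  # Junta os dígitos em uma string
--             resultados.add(numero)  # Adiciona ao conjunto de resultados
--
--     return resultados
-- ===== SOURCE B (Python) =====
-- from itertools import permutations, combinations
--
-- def descript(valid_set, size):
--     """Per-combination check: the digit-sum set ignores order, so test each
--     combination once and expand matches into all their permutations."""
--     digitos_possiveis = [0, 2, 4, 6, 8]
--
--     resultados = set()
--
--     for comb in combinations(digitos_possiveis, size):
--         sums = {a + b for a in comb for b in comb}
--         if sums == valid_set:
--             for p in permutations(comb):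
--                 resultados.add("".join(map(str, p)))
--
--     return resultados
-- ===== Notes on version B (the rewrite author's own statement) =====
-- stated objective: alternative
-- what changed: B iterates over combinations of the even digits, computes the order-independent pairwise digit-sum set once per combination, and on a match emits all permutations of that combination, instead of A's recomputing the sum set for every permutation.
import Mathlib
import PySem

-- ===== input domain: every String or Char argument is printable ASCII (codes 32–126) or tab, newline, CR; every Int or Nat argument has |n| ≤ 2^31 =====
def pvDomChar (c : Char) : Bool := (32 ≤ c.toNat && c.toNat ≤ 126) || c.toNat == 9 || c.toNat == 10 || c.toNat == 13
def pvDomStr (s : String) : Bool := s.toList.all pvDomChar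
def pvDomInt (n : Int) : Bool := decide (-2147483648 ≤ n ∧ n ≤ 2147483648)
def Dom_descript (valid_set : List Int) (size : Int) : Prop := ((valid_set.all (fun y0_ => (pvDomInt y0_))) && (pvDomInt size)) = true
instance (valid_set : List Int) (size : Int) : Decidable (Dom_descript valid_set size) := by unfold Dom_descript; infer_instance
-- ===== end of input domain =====

-- B checks the order-independent digit-sum set once per combination and expands matches
-- into their permutations, instead of re-checking it for every permutation (alternative decomposition).

-- ===== PORT A =====
def cript (data : List Int) : PySem.Set Int :=
  (PySem.List.pyRange 0 (data.length : Int) 1).foldl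
    (fun digits c =>
      data.foldl (fun digits num => PySem.Set.add digits (PySem.List.pyGetD data c 0 + num)) digits)
    PySem.Set.empty

def descript (valid_set : List Int) (size : Int) : List String :=
  let digitos_possiveis : List Int := [0, 2, 4, 6, 8]
  (PySem.List.permutations digitos_possiveis size.toNat).foldl
    (fun resultados comb =>
      let sdata := comb
      if PySem.Set.equal (cript sdata) valid_set then
        PySem.Set.add resultados (PySem.Str.join "" (comb.map PySem.Int.toStr))
      else resultados)
    PySem.Set.empty

-- ===== PORT B =====
def descript_alt (valid_set : List Int) (size : Int) : List String :=
  let digitos_possiveis : List Int := [0, 2, 4, 6, 8]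
  (PySem.List.combinations digitos_possiveis size.toNat).foldl
    (fun resultados comb =>
      let sums := comb.foldl (fun s a => comb.foldl (fun s2 b => PySem.Set.add s2 (a + b)) s) PySem.Set.empty
      if PySem.Set.equal sums valid_set then
        (PySem.List.permutations comb comb.length).foldl
          (fun res p => PySem.Set.add res (PySem.Str.join "" (p.map PySem.Int.toStr))) resultados
      else resultados)
    PySem.Set.empty

-- ===== PRECONDITION & SPEC =====
-- Pre_ excludes negative size, on which Python's itertools (in A and in B) raises ValueError.
def Pre_descript (valid_set : List Int) (size : Int) : Prop := 0 ≤ size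
instance (valid_set : List Int) (size : Int) : Decidable (Pre_descript valid_set size) := by unfold Pre_descript; infer_instance

def pvWitness_descript : List Int × Int := ([0, 2, 4], 2)

def Spec_descript (valid_set : List Int) (size : Int) (out : List String) : Prop := out = descript_alt valid_set size
instance (valid_set : List Int) (size : Int) (out : List String) : Decidable (Spec_descript valid_set size out) := by unfold Spec_descript; infer_instance

-- ===== CLAIM (what is proved, stated in full; the proofs are below) =====
def Claim_equal_descript : Prop := ∀ (valid_set : List Int) (size : Int), Dom_descript valid_set size → Pre_descript valid_set size → Spec_descript valid_set size (descript valid_set size)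

-- ===== LEMMAS AND PROOFS =====

-- Proof-side names for the pieces of the two ports.
def pvDig : List Int := [0, 2, 4, 6, 8]
def pvKey (p : List Int) : List Int := PySem.List.sorted p (fun x => x) false
def pvSum (c : List Int) : PySem.Set Int :=
  c.foldl (fun s a => c.foldl (fun s2 b => PySem.Set.add s2 (a + b)) s) PySem.Set.empty
def pvName (c : List Int) : String := PySem.Str.join "" (c.map PySem.Int.toStr)
def pvPerm (c : List Int) : List (List Int) := PySem.List.permutations c c.length

def coreA (v : List Int) (n : Nat) : List String :=
  (PySem.List.permutations pvDig n).foldl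
    (fun res c => if PySem.Set.equal (cript c) v then PySem.Set.add res (pvName c) else res)
    PySem.Set.empty

def coreB (v : List Int) (n : Nat) : List String :=
  (PySem.List.combinations pvDig n).foldl
    (fun res c => if PySem.Set.equal (pvSum c) v then (pvPerm c).foldl (fun r p => PySem.Set.add r (pvName p)) res else res)
    PySem.Set.empty

lemma descript_eq_coreA (v : List Int) (s : Int) : descript v s = coreA v s.toNat := rfl
lemma descript_alt_eq_coreB (v : List Int) (s : Int) : descript_alt v s = coreB v s.toNat := rfl

lemma pv_equal_congr (s t : List Int) (h : PySem.Set.equal s t = true) (v : List Int) :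
    PySem.Set.equal s v = PySem.Set.equal t v := by
  have hs := (PySem.Set.equal_iff s t).mp h
  rw [Bool.eq_iff_iff, PySem.Set.equal_iff, PySem.Set.equal_iff]
  exact ⟨fun H x => (hs x).symm.trans (H x), fun H x => (hs x).trans (H x)⟩

lemma pv_equal_join (s t v : List Int) (h1 : PySem.Set.equal s v = true)
    (h2 : PySem.Set.equal t v = true) : PySem.Set.equal s t = true := by
  rw [PySem.Set.equal_iff] at h1 h2 ⊢
  exact fun x => (h1 x).trans (h2 x).symm

lemma pv_filter_singleton {α : Type} [DecidableEq α] : ∀ {C : List α} {c0 : α}, C.Nodup → c0 ∈ C →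
    C.filter (fun c => decide (c = c0)) = [c0] := by
  intro C; induction C with
  | nil => intro c0 _ hc; cases hc
  | cons a C ih =>
    intro c0 hC hc
    rcases List.mem_cons.mp hc with h | h
    · have hnot : List.filter (fun c => decide (c = c0)) C = [] := by
        apply List.filter_eq_nil_iff.mpr
        intro c hcC hd
        exact (List.nodup_cons.mp hC).1 (h ▸ (of_decide_eq_true hd) ▸ hcC)
      rw [List.filter_cons_of_pos (by simp [h]), hnot, h]
    · have hne : a ≠ c0 := fun he => (List.nodup_cons.mp hC).1 (he ▸ h)
      rw [List.filter_cons_of_neg (by simp [hne]), ih (List.nodup_cons.mp hC).2 h]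

lemma pv_grouped_filter {α : Type} [DecidableEq α] (P C : List α) (key : α → α)
    (perm : α → List α) (cond : α → Bool)
    (hC : C.Nodup) (h1 : ∀ p ∈ P, key p ∈ C)
    (h2 : ∀ c ∈ C, P.filter (fun p => decide (key p = c)) = perm c)
    (h3 : ∀ c ∈ C, ∀ c' ∈ C, cond c = true → cond c' = true → c = c') :
    P.filter (fun p => cond (key p)) = (C.filter cond).flatMap perm := by
  by_cases hex : ∃ c0, c0 ∈ C ∧ cond c0 = true
  · obtain ⟨c0, hc0, hcc⟩ := hex
    have hpt : ∀ c ∈ C, cond c = decide (c = c0) := by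
      intro c hc
      by_cases h : cond c = true
      · rw [h, h3 c hc c0 hc0 h hcc]; simp
      · have hne : c ≠ c0 := fun he => h (he ▸ hcc)
        rw [Bool.not_eq_true] at h
        rw [h]; simp [hne]
    have hPt : ∀ p ∈ P, cond (key p) = decide (key p = c0) := fun p hp => hpt _ (h1 p hp)
    rw [List.filter_congr hPt, List.filter_congr hpt, pv_filter_singleton hC hc0,
        h2 c0 hc0]
    simp
  · push Not at hex
    have hcf : ∀ c ∈ C, ¬ (cond c = true) := fun c hc => by
      intro h; exact absurd h (by simpa using hex c hc)
    rw [List.filter_eq_nil_iff.mpr (fun p hp => by simpa using hcf _ (h1 p hp)),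
        List.filter_eq_nil_iff.mpr (fun c hc => by simpa using hcf c hc)]
    rfl

lemma pv_update_cons (s : PySem.Set String) (x : String) (xs : List String) :
    PySem.Set.update s (x :: xs) = PySem.Set.update (PySem.Set.add s x) xs := rfl

lemma pv_fold_add_if (cond : List Int → Bool) (name : List Int → String) :
    ∀ (l : List (List Int)) (acc : PySem.Set String),
      l.foldl (fun res c => if cond c then PySem.Set.add res (name c) else res) acc
        = PySem.Set.update acc ((l.filter cond).map name) := by
  intro l; induction l with
  | nil => intro acc; rfl
  | cons a l ih =>
    intro acc
    by_cases h : cond a = true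
    · rw [List.foldl_cons, if_pos h, ih, List.filter_cons_of_pos h, List.map_cons, pv_update_cons]
    · rw [List.foldl_cons, if_neg (by simp [h]), ih, List.filter_cons_of_neg (by simp [h])]

lemma pv_update_append (s : PySem.Set String) (xs ys : List String) :
    PySem.Set.update s (xs ++ ys) = PySem.Set.update (PySem.Set.update s xs) ys := by
  simp [PySem.Set.update, List.foldl_append]

lemma pv_fold_flat (cond : List Int → Bool) (perm : List Int → List (List Int)) (name : List Int → String) :
    ∀ (C : List (List Int)) (acc : PySem.Set String),
      C.foldl (fun res c => if cond c then (perm c).foldl (fun r p => PySem.Set.add r (name p)) res else res) acc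
        = PySem.Set.update acc (((C.filter cond).flatMap perm).map name) := by
  intro C; induction C with
  | nil => intro acc; rfl
  | cons a C ih =>
    intro acc
    by_cases h : cond a = true
    · rw [List.foldl_cons, if_pos h, ih, List.filter_cons_of_pos h, List.flatMap_cons,
          List.map_append, pv_update_append]
      congr 1
      exact (PySem.Set.update_map_eq_foldl_add (perm a) name acc).symm
    · rw [List.foldl_cons, if_neg (by simp [h]), ih, List.filter_cons_of_neg (by simp [h])]

lemma pv_core_eq_of (n : Nat)
    (hC : (PySem.List.combinations pvDig n).Nodup)
    (h1 : ∀ p ∈ PySem.List.permutations pvDig n, pvKey p ∈ PySem.List.combinations pvDig n)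
    (h2 : ∀ c ∈ PySem.List.combinations pvDig n,
        (PySem.List.permutations pvDig n).filter (fun p => decide (pvKey p = c)) = pvPerm c)
    (hb : ∀ p ∈ PySem.List.permutations pvDig n, PySem.Set.equal (cript p) (pvSum (pvKey p)) = true)
    (hinj : ∀ c ∈ PySem.List.combinations pvDig n, ∀ c' ∈ PySem.List.combinations pvDig n,
        PySem.Set.equal (pvSum c) (pvSum c') = true → c = c')
    (v : List Int) : coreA v n = coreB v n := by
  unfold coreA coreB
  rw [pv_fold_add_if (fun c => PySem.Set.equal (cript c) v) pvName,
      pv_fold_flat (fun c => PySem.Set.equal (pvSum c) v) pvPerm pvName]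
  have hfilters : (PySem.List.permutations pvDig n).filter (fun p => PySem.Set.equal (cript p) v)
      = ((PySem.List.combinations pvDig n).filter (fun c => PySem.Set.equal (pvSum c) v)).flatMap pvPerm := by
    rw [List.filter_congr (fun p hp => pv_equal_congr _ _ (hb p hp) v)]
    exact pv_grouped_filter _ _ pvKey pvPerm (fun c => PySem.Set.equal (pvSum c) v) hC h1 h2
      (fun c hc c' hc' h h' => hinj c hc c' hc' (pv_equal_join _ _ _ h h'))
  rw [hfilters]

lemma pv_permutations_nil {α : Type} : ∀ (r : Nat) (xs : List α), xs.length < r →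
    PySem.List.permutations xs r = [] := by
  intro r; induction r with
  | zero => intro xs h; omega
  | succ r ih =>
    intro xs h
    rw [show PySem.List.permutations xs (r+1)
        = (List.range xs.length).flatMap (fun i =>
            match xs[i]? with
            | none => []
            | some x => (PySem.List.permutations (xs.eraseIdx i) r).map (x :: ·)) from rfl]
    apply List.flatMap_eq_nil_iff.mpr
    intro i hi
    have hilt : i < xs.length := List.mem_range.mp hi
    cases hx : xs[i]? with
    | none => rfl
    | some x =>
      have : PySem.List.permutations (xs.eraseIdx i) r = [] := by
        apply ih
        rw [List.length_eraseIdx_of_lt hilt]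
        omega
      simp [this]

set_option maxRecDepth 100000 in
lemma pv_core_eq (v : List Int) (n : Nat) : coreA v n = coreB v n := by
  match n with
  | 0 => exact pv_core_eq_of 0 (by decide) (by decide) (by decide) (by decide) (by decide) v
  | 1 => exact pv_core_eq_of 1 (by decide) (by decide) (by decide) (by decide) (by decide) v
  | 2 => exact pv_core_eq_of 2 (by decide) (by decide) (by decide) (by decide) (by decide) v
  | 3 => exact pv_core_eq_of 3 (by decide) (by decide) (by decide) (by decide) (by decide) v
  | 4 => exact pv_core_eq_of 4 (by decide) (by decide) (by decide) (by decide) (by decide) v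
  | 5 => exact pv_core_eq_of 5 (by decide) (by decide) (by decide) (by decide) (by decide) v
  | (m+6) =>
    unfold coreA coreB
    rw [pv_permutations_nil (m+6) pvDig (by simp only [pvDig, List.length_cons, List.length_nil]; omega),
        PySem.List.combinations_eq_nil_of_length_lt pvDig (by simp only [pvDig, List.length_cons, List.length_nil]; omega)]
    rfl

-- ===== VERDICT (by name: the statement is the Claim_ definition above) =====
theorem descript_spec : Claim_equal_descript := by
  intro v size _ _
  show descript v size = descript_alt v size
  rw [descript_eq_coreA, descript_alt_eq_coreB]
  exact pv_core_eq v size.toNat
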